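-- pv_equiv track=rewrite | github.com/tech-srl/RNN_to_PRS_CFG | RNNTokenPredictor.py | _check_seqs
-- ===== SOURCE A (Python) =====
-- def _check_seqs(indices_seqs,func_name,empty_seqs_ok=False):
-- 	def issorted(a):
-- 		return sorted(a,reverse=True)==a
-- 	assert indices_seqs, func_name+" expects at least one seq"
--
-- 	lengths = [len(s) for s in indices_seqs]
-- 	assert (issorted(lengths)), func_name+" expect seqs sorted by descending order"
-- 	if not empty_seqs_ok:
-- 		assert lengths[-1]>0, func_name+" expects non-empty seqs, got:" + str(indices_seqs)
-- 	return lengths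
-- ===== SOURCE B (Python) =====
-- def _check_seqs(indices_seqs, func_name, empty_seqs_ok=False):
-- 	assert indices_seqs, func_name+" expects at least one seq"
-- 	# single pass: build lengths while checking descending order with a prev accumulator
-- 	prev = len(indices_seqs[0])
-- 	lengths = [prev]
-- 	ok = True
-- 	for s in indices_seqs[1:]:
-- 		n = len(s)
-- 		if n > prev:
-- 			ok = False
-- 		lengths.append(n)
-- 		prev = n
-- 	assert ok, func_name+" expect seqs sorted by descending order"
-- 	if not empty_seqs_ok:
-- 		assert prev > 0, func_name+" expects non-empty seqs, got:" + str(indices_seqs)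
-- 	return lengths
-- ===== Notes on version B (the rewrite author's own statement) =====
-- stated objective: simpler
-- what changed: Replaces the sort-and-compare issorted helper over a precomputed lengths list with a single forward pass that builds lengths while checking descending order via a prev accumulator, which also yields the last length for the non-empty check.
import Mathlib
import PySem

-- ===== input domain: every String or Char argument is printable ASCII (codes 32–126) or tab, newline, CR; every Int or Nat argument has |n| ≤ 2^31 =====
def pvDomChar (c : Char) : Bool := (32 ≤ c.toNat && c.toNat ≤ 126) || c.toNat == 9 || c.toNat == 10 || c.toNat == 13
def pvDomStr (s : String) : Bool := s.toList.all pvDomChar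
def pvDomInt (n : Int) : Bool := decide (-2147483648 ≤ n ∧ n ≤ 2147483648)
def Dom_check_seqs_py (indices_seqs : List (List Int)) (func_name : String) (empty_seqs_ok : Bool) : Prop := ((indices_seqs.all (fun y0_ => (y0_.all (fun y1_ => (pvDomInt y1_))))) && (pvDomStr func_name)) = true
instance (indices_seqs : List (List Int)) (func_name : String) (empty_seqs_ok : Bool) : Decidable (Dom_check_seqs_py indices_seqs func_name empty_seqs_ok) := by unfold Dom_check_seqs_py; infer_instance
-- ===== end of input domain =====

-- B replaces A's sort-and-compare `issorted` over a precomputed lengths list by one forward pass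
-- that builds lengths while checking descending order with a prev accumulator (simpler).
-- A raises AssertionError outside Pre_; there the ports return [] (a value Python never produces).

-- ===== PORT A =====
-- assert failures (Python raises) are modelled by returning []; Pre_ excludes exactly those inputs
def check_seqs_py (indices_seqs : List (List Int)) (func_name : String) (empty_seqs_ok : Bool) : List Int :=
  if indices_seqs = [] then []
  else
    let lengths : List Int := indices_seqs.map (fun s => (s.length : Int))
    -- issorted: sorted(a, reverse=True) == a
    if PySem.List.sorted lengths (fun x => x) true = lengths then
      if empty_seqs_ok = false then
        if 0 < PySem.List.pyGetD lengths (-1) 0 then lengths else []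
      else lengths
    else []

-- ===== PORT B =====
-- the loop `for s in indices_seqs[1:]` with accumulators (lengths, ok, prev), as structural recursion
def altGo (prev : Int) : List (List Int) → List Int × Bool × Int
  | [] => ([], true, prev)
  | s :: t =>
    let n : Int := s.length
    let r := altGo n t
    (n :: r.1, (if prev < n then false else r.2.1), r.2.2)

def check_seqs_py_alt (indices_seqs : List (List Int)) (func_name : String) (empty_seqs_ok : Bool) : List Int :=
  match indices_seqs with
  | [] => []
  | s0 :: rest =>
    let p0 : Int := s0.length
    let r := altGo p0 rest
    let lengths := p0 :: r.1
    if r.2.1 then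
      if empty_seqs_ok = false then
        if 0 < r.2.2 then lengths else []
      else lengths
    else []

-- ===== PRECONDITION & SPEC =====
-- Pre_ excludes exactly the inputs on which A's asserts fail (Python raises AssertionError):
-- empty list, lengths not non-increasing, or (unless empty_seqs_ok) a last sequence that is empty.
def Pre_check_seqs_py (indices_seqs : List (List Int)) (func_name : String) (empty_seqs_ok : Bool) : Prop :=
  indices_seqs ≠ [] ∧
  List.IsChain (fun a b => b ≤ a) (indices_seqs.map (fun s => (s.length : Int))) ∧
  (empty_seqs_ok = true ∨ 0 < (indices_seqs.getLast?.getD []).length)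
instance (indices_seqs : List (List Int)) (func_name : String) (empty_seqs_ok : Bool) : Decidable (Pre_check_seqs_py indices_seqs func_name empty_seqs_ok) := by unfold Pre_check_seqs_py; infer_instance

def pvWitness_check_seqs_py : List (List Int) × String × Bool := ([[1, 2], [3]], "f", false)

def Spec_check_seqs_py (indices_seqs : List (List Int)) (func_name : String) (empty_seqs_ok : Bool) (out : List Int) : Prop := out = check_seqs_py_alt indices_seqs func_name empty_seqs_ok
instance (indices_seqs : List (List Int)) (func_name : String) (empty_seqs_ok : Bool) (out : List Int) : Decidable (Spec_check_seqs_py indices_seqs func_name empty_seqs_ok out) := by unfold Spec_check_seqs_py; infer_instance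

-- ===== CLAIM (what is proved, stated in full; the proofs are below) =====
def Claim_equal_check_seqs_py : Prop := ∀ (indices_seqs : List (List Int)) (func_name : String) (empty_seqs_ok : Bool), Dom_check_seqs_py indices_seqs func_name empty_seqs_ok → Pre_check_seqs_py indices_seqs func_name empty_seqs_ok → Spec_check_seqs_py indices_seqs func_name empty_seqs_ok (check_seqs_py indices_seqs func_name empty_seqs_ok)

-- ===== LEMMAS AND PROOFS =====

-- under a non-increasing adjacent chain, B's pass returns the mapped lengths, ok = true, and the last length
lemma altGo_of_chain (rest : List (List Int)) : ∀ (prev : Int),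
    List.IsChain (fun a b => b ≤ a) (prev :: rest.map (fun s => (s.length : Int))) →
    altGo prev rest = (rest.map (fun s => (s.length : Int)), true,
      (rest.map (fun s => (s.length : Int))).getLastD prev) := by
  induction rest with
  | nil => intro prev _; rfl
  | cons s t ih =>
    intro prev h
    rw [List.map_cons] at h
    obtain ⟨hle, ht⟩ := List.isChain_cons_cons.mp h
    simp only [altGo, List.map_cons]
    rw [ih _ ht, if_neg (not_lt.mpr hle), List.getLastD_cons]

-- a non-increasing adjacent chain makes A's sort-and-compare pass
lemma sorted_rev_eq_of_chain (l : List Int) (h : List.IsChain (fun a b => b ≤ a) l) :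
    PySem.List.sorted l (fun x => x) true = l := by
  apply PySem.List.sorted_rev_eq_self_of_pairwise
  exact h.pairwise

lemma getLast_cons_eq_getLastD (a : Int) (t : List Int) (h : a :: t ≠ []) :
    (a :: t).getLast h = t.getLastD a := by
  induction t generalizing a with
  | nil => rfl
  | cons b t' ih => rw [List.getLast_cons (by simp), ih, List.getLastD_cons]

-- ===== VERDICT (by name: the statement is the Claim_ definition above) =====
theorem check_seqs_py_spec : Claim_equal_check_seqs_py := by
  intro xs fn ok _hdom hpre
  rcases hpre with ⟨hne, hchain, hlast⟩
  unfold Spec_check_seqs_py check_seqs_py check_seqs_py_alt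
  cases xs with
  | nil => exact absurd rfl hne
  | cons s0 rest =>
    simp only [List.map_cons] at hchain ⊢
    rw [if_neg (by simp), altGo_of_chain rest _ hchain,
      sorted_rev_eq_of_chain _ hchain]
    have hg : PySem.List.pyGetD ((s0.length : Int) :: rest.map (fun s => (s.length : Int))) (-1) 0
        = (rest.map (fun s => (s.length : Int))).getLastD (s0.length : Int) := by
      rw [PySem.List.pyGetD_neg_one _ 0 (by simp)]
      exact getLast_cons_eq_getLastD _ _ _
    rw [hg]
    simp
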